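-- pv_equiv track=rewrite | github.com/thealper2/leetcode-solutions | 3700-3799/3723-Maximize-Sum-of-Squares-of-Digits.py | maxSumOfSquares
-- ===== SOURCE A (Python) =====
-- def maxSumOfSquares(num: int, sum_: int) -> str:
--     if sum_ > 9 * num or sum_ < 0:
--         return ""
--
--     result = ['0'] * num
--     remaining_sum = sum_
--
--     for i in range(num):
--         digit = min(9, remaining_sum)
--         result[i] = str(digit)
--         remaining_sum -= digit
--
--     if remaining_sum > 0:
--         return ''
--
--     return ''.join(result)
-- ===== SOURCE B (Python) =====
-- def maxSumOfSquares(num: int, sum_: int) -> str: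
--     if sum_ > 9 * num or sum_ < 0:
--         return ""
--     q, r = divmod(sum_, 9)
--     pad = num - q - (1 if r else 0)
--     return "9" * q + (str(r) if r else "") + "0" * pad
-- ===== Notes on version B (the rewrite author's own statement) =====
-- stated objective: simpler
-- what changed: Replaces A's per-position greedy loop (allocate ['0']*num, write min(9, remaining) at each index, track the remaining budget) by the closed form sum_ = 9*q + r: the answer is '9'*q, then str(r) if r > 0, then '0'-padding to length num.
import Mathlib
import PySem

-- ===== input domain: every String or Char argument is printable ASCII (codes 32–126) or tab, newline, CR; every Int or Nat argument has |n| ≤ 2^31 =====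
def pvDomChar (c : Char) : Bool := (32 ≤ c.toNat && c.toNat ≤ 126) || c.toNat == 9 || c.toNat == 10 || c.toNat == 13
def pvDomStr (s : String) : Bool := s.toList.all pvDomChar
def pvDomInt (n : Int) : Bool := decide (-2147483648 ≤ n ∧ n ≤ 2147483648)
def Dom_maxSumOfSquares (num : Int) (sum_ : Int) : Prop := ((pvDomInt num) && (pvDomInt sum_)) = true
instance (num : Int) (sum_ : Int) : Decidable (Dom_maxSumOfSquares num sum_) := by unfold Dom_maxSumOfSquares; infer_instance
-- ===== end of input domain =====

-- B replaces A's per-position greedy loop by the closed form sum_ = 9*q + r: '9'*q, then r if nonzero, then '0'-padding (objective: simpler).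


-- ===== PORT A =====
-- literal port of A: build ['0']*num, loop over range(num) setting result[i] = str(min(9, remaining)),
-- then the remaining_sum > 0 check and ''.join(result).
def maxSumOfSquares (num : Int) (sum_ : Int) : String :=
  if sum_ > 9 * num || sum_ < 0 then ""
  else
    let st :=
      (PySem.List.pyRange 0 num 1).foldl
        (fun (st : List String × Int) i =>
          let digit := min 9 st.2
          (PySem.List.pySetD st.1 i (PySem.Int.toStr digit), st.2 - digit))
        (List.replicate num.toNat "0", sum_)
    if st.2 > 0 then "" else PySem.Str.join "" st.1

-- ===== PORT B =====
-- literal port of B: q, r = divmod(sum_, 9); "9"*q + (str(r) if r else "") + "0"*pad,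
-- string repetition/concatenation done on the character lists under one String.ofList.
def maxSumOfSquares_alt (num : Int) (sum_ : Int) : String :=
  if sum_ > 9 * num || sum_ < 0 then ""
  else
    let q := PySem.Int.floordiv sum_ 9
    let r := PySem.Int.mod sum_ 9
    let pad := num - q - (if r ≠ 0 then 1 else 0)
    String.ofList (List.replicate q.toNat '9'
      ++ (if r ≠ 0 then PySem.Int.toChars r else [])
      ++ List.replicate pad.toNat '0')

-- ===== PRECONDITION & SPEC =====
def Spec_maxSumOfSquares (num : Int) (sum_ : Int) (out : String) : Prop := out = maxSumOfSquares_alt num sum_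
instance (num : Int) (sum_ : Int) (out : String) : Decidable (Spec_maxSumOfSquares num sum_ out) := by unfold Spec_maxSumOfSquares; infer_instance

-- ===== CLAIM (what is proved, stated in full; the proofs are below) =====
def Claim_equal_maxSumOfSquares : Prop := ∀ (num : Int) (sum_ : Int), Dom_maxSumOfSquares num sum_ → Spec_maxSumOfSquares num sum_ (maxSumOfSquares num sum_)

-- ===== LEMMAS AND PROOFS =====

-- the list of digit strings A's greedy loop writes, front to back
def pvDigits : Nat → Int → List String
  | 0, _ => []
  | n + 1, s => PySem.Int.toStr (min 9 s) :: pvDigits n (s - min 9 s)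

-- A's loop body, named for the lemmas (definitionally the lambda in the port)
def pvStepA (st : List String × Int) (i : Int) : List String × Int :=
  let digit := min 9 st.2
  (PySem.List.pySetD st.1 i (PySem.Int.toStr digit), st.2 - digit)

lemma pvStepA_shift (idxs : List Int) (h : ∀ i ∈ idxs, 0 ≤ i) (x : String)
    (l : List String) (s : Int) :
    (idxs.map (· + 1)).foldl pvStepA (x :: l, s)
      = (x :: (idxs.foldl pvStepA (l, s)).1, (idxs.foldl pvStepA (l, s)).2) := by
  induction idxs generalizing l s with
  | nil => simp
  | cons i t ih =>
    have hi : (0:Int) ≤ i := h i (by simp)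
    have hset : PySem.List.pySetD (x :: l) (i + 1) (PySem.Int.toStr (min 9 s))
        = x :: PySem.List.pySetD l i (PySem.Int.toStr (min 9 s)) := by
      rw [PySem.List.pySetD_of_nonneg _ _ (by omega : (0:Int) ≤ i + 1),
          PySem.List.pySetD_of_nonneg _ _ hi]
      have : (i + 1).toNat = i.toNat + 1 := by omega
      simp [this]
    simp only [List.map_cons, List.foldl_cons, pvStepA, hset]
    exact ih (fun j hj => h j (by simp [hj])) _ _

lemma pvLoop_char (n : Nat) (s : Int) (hs : 0 ≤ s) (hle : s ≤ 9 * n) :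
    (PySem.List.pyRange 0 (n : Int) 1).foldl pvStepA (List.replicate n "0", s)
      = (pvDigits n s, 0) := by
  induction n generalizing s with
  | zero =>
    have : s = 0 := by omega
    simp [this, PySem.List.pyRange_one_eq_nil, pvDigits]
  | succ n ih =>
    have hcons : PySem.List.pyRange 0 ((n : Int) + 1) 1
        = 0 :: PySem.List.pyRange 1 ((n : Int) + 1) 1 :=
      PySem.List.pyRange_one_cons (by omega)
    have hmap : PySem.List.pyRange 1 ((n : Int) + 1) 1
        = (PySem.List.pyRange 0 (n : Int) 1).map (· + 1) := by
      rw [PySem.List.pyRange_one, PySem.List.pyRange_one]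
      simp [List.map_map, Function.comp_def, add_comm]
    have hmem : ∀ i ∈ PySem.List.pyRange 0 (n : Int) 1, (0:Int) ≤ i := by
      intro i hi
      have := (PySem.List.mem_pyRange_one).1 hi
      omega
    have hd : 0 ≤ s - min 9 s ∧ s - min 9 s ≤ 9 * n := by
      constructor; · omega
      · rcases le_or_gt 9 s with h9 | h9
        · have : min (9:Int) s = 9 := by omega
          rw [this]; push_cast at hle ⊢; omega
        · have : min (9:Int) s = s := by omega
          rw [this]; omega
    have hset0 : PySem.List.pySetD (List.replicate (n+1) "0") (0:Int)
          (PySem.Int.toStr (min 9 s))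
        = PySem.Int.toStr (min 9 s) :: List.replicate n "0" := by
      rw [PySem.List.pySetD_of_nonneg _ _ (le_refl (0:Int))]
      simp [List.replicate_succ]
    have hn1 : ((n + 1 : Nat) : Int) = (n : Int) + 1 := by push_cast; ring
    rw [hn1, hcons, hmap]
    simp only [List.foldl_cons, pvStepA, hset0]
    rw [pvStepA_shift _ hmem, ih (s - min 9 s) hd.1 hd.2]
    simp [pvDigits]

lemma pvDigits_zero (n : Nat) : pvDigits n 0 = List.replicate n "0" := by
  induction n with
  | zero => rfl
  | succ n ih => simp [pvDigits, ih, List.replicate_succ]; decide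

lemma pvJoin_nil (ps : List (List Char)) : PySem.Chars.join [] ps = ps.flatten := by
  induction ps with
  | nil => simp [PySem.Chars.join_nil]
  | cons p t ih =>
    cases t with
    | nil => simp [PySem.Chars.join_singleton]
    | cons q r => rw [PySem.Chars.join_cons_cons]; simp at ih ⊢; rw [ih]

lemma pvFlat_rep (n : Nat) :
    ((List.replicate n ("0" : String)).map String.toList).flatten = List.replicate n '0' := by
  induction n with
  | zero => rfl
  | succ n ih =>
    simp only [List.replicate_succ, List.map_cons, List.flatten_cons] at ih ⊢
    simp

lemma pvFlat_digits (n : Nat) (s : Int) (hs : 0 ≤ s) (hle : s ≤ 9 * n) :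
    ((pvDigits n s).map String.toList).flatten
      = List.replicate (PySem.Int.floordiv s 9).toNat '9'
        ++ (if PySem.Int.mod s 9 ≠ 0 then PySem.Int.toChars (PySem.Int.mod s 9) else [])
        ++ List.replicate (n - (PySem.Int.floordiv s 9).toNat
              - (if PySem.Int.mod s 9 ≠ 0 then 1 else 0)) '0' := by
  induction n generalizing s with
  | zero =>
    have : s = 0 := by omega
    subst this
    simp [pvDigits, PySem.Int.floordiv, PySem.Int.mod]
  | succ n ih =>
    rw [PySem.Int.floordiv_eq_ediv_of_pos (by norm_num : (0:Int) < 9),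
        PySem.Int.mod_eq_emod_of_pos (by norm_num : (0:Int) < 9)]
    rcases le_or_gt 9 s with h9 | h9
    · -- digit = 9
      have hmin : min (9:Int) s = 9 := by omega
      have hrec := ih (s - 9) (by omega) (by push_cast at hle ⊢; omega)
      rw [PySem.Int.floordiv_eq_ediv_of_pos (by norm_num : (0:Int) < 9),
          PySem.Int.mod_eq_emod_of_pos (by norm_num : (0:Int) < 9)] at hrec
      have hq : (s / 9).toNat = ((s - 9) / 9).toNat + 1 := by omega
      have hr : s % 9 = (s - 9) % 9 := by omega
      have h9c : (PySem.Int.toStr 9).toList = ['9'] := by decide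
      simp only [pvDigits, hmin, List.map_cons, List.flatten_cons, hrec, hq, hr, h9c,
        List.replicate_succ, List.cons_append]
      simp
    · -- digit = s, rest is zeros
      have hmin : min (9:Int) s = s := by omega
      have hq : (s / 9).toNat = 0 := by omega
      simp only [pvDigits, hmin, sub_self, pvDigits_zero, List.map_cons, List.flatten_cons,
        pvFlat_rep, hq, List.replicate_zero, List.nil_append]
      by_cases h0 : s = 0
      · subst h0
        simp [PySem.Int.toList_toStr, show PySem.Int.toChars 0 = ['0'] from by decide,
          List.replicate_succ]
      · have hss : s % 9 = s := by omega
        rw [hss, PySem.Int.toList_toStr, if_pos (by omega : s ≠ 0), if_pos (by omega : s ≠ 0)]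
        simp

-- ===== VERDICT (by name: the statement is the Claim_ definition above) =====
theorem maxSumOfSquares_spec : Claim_equal_maxSumOfSquares := by
  intro num sum_ _
  unfold Spec_maxSumOfSquares maxSumOfSquares maxSumOfSquares_alt
  split_ifs with hg
  · rfl
  · simp only [Bool.or_eq_true, decide_eq_true_eq, not_or, not_lt] at hg
    have hs0 : 0 ≤ sum_ := hg.2
    have hle : sum_ ≤ 9 * num := hg.1
    obtain ⟨n, rfl⟩ : ∃ n : Nat, num = (n : Int) := ⟨num.toNat, by omega⟩
    have hle' : sum_ ≤ 9 * (n : Int) := hle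
    have hfold : (PySem.List.pyRange 0 (n : Int) 1).foldl
        (fun (st : List String × Int) i =>
          let digit := min 9 st.2
          (PySem.List.pySetD st.1 i (PySem.Int.toStr digit), st.2 - digit))
        (List.replicate ((n : Int)).toNat "0", sum_) = (pvDigits n sum_, 0) := by
      have := pvLoop_char n sum_ hs0 hle'
      simpa [pvStepA] using this
    rw [hfold]
    simp only [gt_iff_lt, lt_irrefl, if_false]
    have hchars : (PySem.Str.join "" (pvDigits n sum_)).toList
        = List.replicate (PySem.Int.floordiv sum_ 9).toNat '9'
          ++ (if PySem.Int.mod sum_ 9 ≠ 0 then PySem.Int.toChars (PySem.Int.mod sum_ 9) else [])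
          ++ List.replicate (n - (PySem.Int.floordiv sum_ 9).toNat
                - (if PySem.Int.mod sum_ 9 ≠ 0 then 1 else 0)) '0' := by
      rw [PySem.Str.toList_join]
      have : ("" : String).toList = [] := rfl
      rw [this, pvJoin_nil, pvFlat_digits n sum_ hs0 hle']
    have hpad : (n - (PySem.Int.floordiv sum_ 9).toNat
          - (if PySem.Int.mod sum_ 9 ≠ 0 then 1 else 0))
        = ((n : Int) - PySem.Int.floordiv sum_ 9
            - (if PySem.Int.mod sum_ 9 ≠ 0 then 1 else 0)).toNat := by
      rw [PySem.Int.floordiv_eq_ediv_of_pos (by norm_num : (0:Int) < 9),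
          PySem.Int.mod_eq_emod_of_pos (by norm_num : (0:Int) < 9)]
      by_cases hr : sum_ % 9 = 0 <;> simp [hr] <;> omega
    apply String.toList_injective
    rw [hchars, String.toList_ofList, hpad]
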